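-- pv_equiv track=rewrite | github.com/code-coffee-ufcg/braillingo-backend | braillingo-demo/obr.py | get_delimiters
-- ===== SOURCE A (Python) =====
-- def get_delimiters(hist):
--     '''
--     Encontra os delimitadores verticais e horizontais da posição onde se
--     encontram os pontos dos caracteres braille por meio do histograma
--
--     Entrada:
--     hist --> Array com os valores do histograma
--
--     Saída:
--     delimiters --> Array com os delimitadores de posição dos pontos
--
--     '''
--     delimiters = list()
--     for i in range(1, len(hist)-1):
--         if (hist[i] > 0) and (hist[i-1] == 0) and (hist[i+1] > 0):
--             delimiters.append(i-1)
--         if (hist[i] > 0) and (hist[i-1] > 0) and (hist[i+1] == 0):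
--             delimiters.append(i+1)
--
--     return delimiters
-- ===== SOURCE B (Python) =====
-- def get_delimiters(hist):
--     # B: find maximal runs of positive values, then emit delimiters per run.
--     n = len(hist)
--     runs = []
--     start = None
--     for i, v in enumerate(hist):
--         if v > 0:
--             if start is None:
--                 start = i
--         elif start is not None:
--             runs.append((start, i - 1))
--             start = None
--     if start is not None:
--         runs.append((start, n - 1))
--     out = []
--     for (s, e) in runs:
--         if e > s:
--             if s >= 1 and hist[s - 1] == 0:
--                 out.append(s - 1)
--             if e <= n - 2 and hist[e + 1] == 0:
--                 out.append(e + 1)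
--     return out
-- ===== Notes on version B (the rewrite author's own statement) =====
-- stated objective: alternative
-- what changed: A scans every interior index and tests a 3-cell window twice per position; B first extracts the maximal runs of positive histogram values and then emits each length>=2 run's zero neighbours (start-1, end+1) from the run list.
import Mathlib
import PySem

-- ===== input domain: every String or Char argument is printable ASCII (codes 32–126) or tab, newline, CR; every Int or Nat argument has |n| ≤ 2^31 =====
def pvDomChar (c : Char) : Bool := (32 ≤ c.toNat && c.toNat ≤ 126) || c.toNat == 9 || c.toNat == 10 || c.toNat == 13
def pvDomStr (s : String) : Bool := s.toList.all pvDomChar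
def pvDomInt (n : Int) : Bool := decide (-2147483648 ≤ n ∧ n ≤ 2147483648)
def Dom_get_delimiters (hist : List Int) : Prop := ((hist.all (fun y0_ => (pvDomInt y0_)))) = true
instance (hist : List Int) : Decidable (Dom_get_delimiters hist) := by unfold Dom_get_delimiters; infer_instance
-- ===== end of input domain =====

-- B replaces A's per-index window scan with a two-phase decomposition (find maximal
-- positive runs, then emit each run's delimiters); objective: alternative decomposition.


-- ===== PORT A =====
def get_delimiters (hist : List Int) : List Int :=
  (PySem.List.pyRange 1 ((hist.length : Int) - 1)).foldl
    (fun delimiters i =>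
      let delimiters :=
        if 0 < PySem.List.pyGetD hist i 0 ∧ PySem.List.pyGetD hist (i - 1) 0 = 0
             ∧ 0 < PySem.List.pyGetD hist (i + 1) 0
        then delimiters ++ [i - 1] else delimiters
      if 0 < PySem.List.pyGetD hist i 0 ∧ 0 < PySem.List.pyGetD hist (i - 1) 0
           ∧ PySem.List.pyGetD hist (i + 1) 0 = 0
      then delimiters ++ [i + 1] else delimiters)
    []

-- ===== PORT B =====
def get_delimiters_alt (hist : List Int) : List Int :=
  let n : Int := hist.length
  -- phase 1: maximal runs of positive values, as (start, end) index pairs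
  let st :=
    (PySem.List.enumerate hist 0).foldl
      (fun (p : List (Int × Int) × Option Int) (iv : Int × Int) =>
        if 0 < iv.2 then
          match p.2 with
          | none => (p.1, some iv.1)
          | some _ => p
        else
          match p.2 with
          | some s => (p.1 ++ [(s, iv.1 - 1)], none)
          | none => p)
      ([], none)
  let runs := match st.2 with
    | some s => st.1 ++ [(s, n - 1)]
    | none => st.1
  -- phase 2: each run of length ≥ 2 contributes its zero neighbours
  runs.foldl
    (fun out se =>
      if se.1 < se.2 then
        let out := if 1 ≤ se.1 ∧ PySem.List.pyGetD hist (se.1 - 1) 0 = 0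
                   then out ++ [se.1 - 1] else out
        if se.2 ≤ n - 2 ∧ PySem.List.pyGetD hist (se.2 + 1) 0 = 0
        then out ++ [se.2 + 1] else out
      else out)
    []

-- ===== PRECONDITION & SPEC =====
def Spec_get_delimiters (hist : List Int) (out : List Int) : Prop := out = get_delimiters_alt hist
instance (hist : List Int) (out : List Int) : Decidable (Spec_get_delimiters hist out) := by unfold Spec_get_delimiters; infer_instance

-- ===== CLAIM (what is proved, stated in full; the proofs are below) =====
def Claim_equal_get_delimiters : Prop := ∀ (hist : List Int), Dom_get_delimiters hist → Spec_get_delimiters hist (get_delimiters hist)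

-- ===== LEMMAS AND PROOFS =====

-- abbreviation for hist[i] (always used with in-range i)
def pvH (hist : List Int) (i : Int) : Int := PySem.List.pyGetD hist i 0

-- per-index contribution of A's loop body
def pvF (hist : List Int) (i : Int) : List Int :=
  (if 0 < pvH hist i ∧ pvH hist (i - 1) = 0 ∧ 0 < pvH hist (i + 1) then [i - 1] else []) ++
  (if 0 < pvH hist i ∧ 0 < pvH hist (i - 1) ∧ pvH hist (i + 1) = 0 then [i + 1] else [])

-- per-run contribution of B's second phase
def pvG (hist : List Int) (n : Int) (se : Int × Int) : List Int :=
  (if se.1 < se.2 ∧ 1 ≤ se.1 ∧ pvH hist (se.1 - 1) = 0 then [se.1 - 1] else []) ++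
  (if se.1 < se.2 ∧ se.2 ≤ n - 2 ∧ pvH hist (se.2 + 1) = 0 then [se.2 + 1] else [])

-- B's run-finding step
def pvStep (p : List (Int × Int) × Option Int) (iv : Int × Int) : List (Int × Int) × Option Int :=
  if 0 < iv.2 then
    match p.2 with
    | none => (p.1, some iv.1)
    | some _ => p
  else
    match p.2 with
    | some s => (p.1 ++ [(s, iv.1 - 1)], none)
    | none => p

def pvFinish (n : Int) (p : List (Int × Int) × Option Int) : List (Int × Int) :=
  match p.2 with
  | some s => p.1 ++ [(s, n - 1)]
  | none => p.1

-- delimiter already emitted by A for the currently open run (start at s, k cells read)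
def pvOpen (hist : List Int) (start : Option Int) (k : Int) : List Int :=
  match start with
  | none => []
  | some s => if s + 1 ≤ k - 1 ∧ 1 ≤ s ∧ pvH hist (s - 1) = 0 then [s - 1] else []

-- invariant of B's run-finding state after reading k cells
def pvInv (hist : List Int) (k : Nat) (start : Option Int) : Prop :=
  match start with
  | none => k = 0 ∨ pvH hist ((k : Int) - 1) ≤ 0
  | some s => 0 ≤ s ∧ s < (k : Int) ∧ (s = 0 ∨ pvH hist (s - 1) ≤ 0) ∧
      ∀ j : Int, s ≤ j → j < (k : Int) → 0 < pvH hist j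

lemma pvA_flatMap (hist : List Int) :
    get_delimiters hist
      = (PySem.List.pyRange 1 ((hist.length : Int) - 1)).flatMap (pvF hist) := by
  unfold get_delimiters
  have h : (fun (delimiters : List Int) (i : Int) =>
      let delimiters :=
        if 0 < PySem.List.pyGetD hist i 0 ∧ PySem.List.pyGetD hist (i - 1) 0 = 0
             ∧ 0 < PySem.List.pyGetD hist (i + 1) 0
        then delimiters ++ [i - 1] else delimiters
      if 0 < PySem.List.pyGetD hist i 0 ∧ 0 < PySem.List.pyGetD hist (i - 1) 0
           ∧ PySem.List.pyGetD hist (i + 1) 0 = 0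
      then delimiters ++ [i + 1] else delimiters)
      = fun acc i => acc ++ pvF hist i := by
    funext acc i
    simp only [pvF, pvH]
    split_ifs <;> simp
  rw [h, PySem.List.foldl_append_eq_flatMap]
  simp

lemma pvB_flatMap (hist : List Int) :
    get_delimiters_alt hist
      = (pvFinish (hist.length : Int)
          ((PySem.List.enumerate hist 0).foldl pvStep ([], none))).flatMap
          (pvG hist (hist.length : Int)) := by
  simp only [get_delimiters_alt]
  have h : (fun (out : List Int) (se : Int × Int) =>
      if se.1 < se.2 then
        let out := if 1 ≤ se.1 ∧ PySem.List.pyGetD hist (se.1 - 1) 0 = 0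
                   then out ++ [se.1 - 1] else out
        if se.2 ≤ (hist.length : Int) - 2 ∧ PySem.List.pyGetD hist (se.2 + 1) 0 = 0
        then out ++ [se.2 + 1] else out
      else out)
      = fun acc se => acc ++ pvG hist (hist.length : Int) se := by
    funext acc se
    simp only [pvG, pvH]
    split_ifs <;> simp_all
  rw [h, PySem.List.foldl_append_eq_flatMap]
  rfl

lemma pvDrop_cons {hist : List Int} {k : Nat} {v : Int} {rest : List Int}
    (h : hist.drop k = v :: rest) : k < hist.length ∧ pvH hist (k : Int) = v := by
  have hk : k < hist.length := by
    by_contra hk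
    rw [List.drop_eq_nil_of_le (by omega)] at h
    simp at h
  refine ⟨hk, ?_⟩
  have h0 : hist[k + 0]? = some v := by
    rw [← List.getElem?_drop, h]
    rfl
  simp only [Nat.add_zero] at h0
  simp [pvH, PySem.List.pyGetD_natCast, List.getD_eq_getElem?_getD, h0]

lemma pvR_succ (hist : List Int) (k : Nat) (hk : k < hist.length) :
    (PySem.List.pyRange (max 1 ((k : Int) - 1)) ((hist.length : Int) - 1)).flatMap (pvF hist)
      = (if 2 ≤ k then pvF hist ((k : Int) - 1) else [])
        ++ (PySem.List.pyRange (max 1 (((k : Int) + 1) - 1)) ((hist.length : Int) - 1)).flatMap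
            (pvF hist) := by
  have hkc : (k : Int) < (hist.length : Int) := by exact_mod_cast hk
  by_cases h2 : 2 ≤ k
  · have h2c : (2 : Int) ≤ (k : Int) := by exact_mod_cast h2
    have hmax : max 1 ((k : Int) - 1) = (k : Int) - 1 := by omega
    have hmax' : max 1 (((k : Int) + 1) - 1) = (k : Int) := by omega
    rw [hmax, hmax',
      PySem.List.pyRange_one_cons (by omega : (k : Int) - 1 < (hist.length : Int) - 1)]
    have : (k : Int) - 1 + 1 = (k : Int) := by omega
    rw [List.flatMap_cons, this, if_pos h2]
  · have hmax : max 1 ((k : Int) - 1) = 1 := by omega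
    have hmax' : max 1 (((k : Int) + 1) - 1) = 1 := by
      have : (k : Int) ≤ 1 := by exact_mod_cast Nat.le_of_lt_succ (by omega : k < 2)
      omega
    rw [hmax, hmax', if_neg h2, List.nil_append]

lemma pvMain (hist : List Int) (rest : List Int) :
    ∀ (k : Nat) (runs : List (Int × Int)) (start : Option Int),
    hist.drop k = rest → k ≤ hist.length → pvInv hist k start →
    (pvFinish (hist.length : Int)
        ((PySem.List.enumerate rest (k : Int)).foldl pvStep (runs, start))).flatMap
        (pvG hist (hist.length : Int))
      = runs.flatMap (pvG hist (hist.length : Int)) ++ pvOpen hist start k ++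
        (PySem.List.pyRange (max 1 ((k : Int) - 1)) ((hist.length : Int) - 1)).flatMap
          (pvF hist) := by
  induction rest with
  | nil =>
    intro k runs start hdrop hk2 hinv
    have hk : hist.length ≤ k := by
      have hlen := congrArg List.length hdrop
      simp at hlen
      omega
    have hknc : (k : Int) = (hist.length : Int) := by omega
    rw [PySem.List.enumerate_nil, List.foldl_nil,
      PySem.List.pyRange_one_eq_nil (by omega : (hist.length : Int) - 1 ≤ max 1 ((k : Int) - 1))]
    cases start with
    | none => simp [pvFinish, pvOpen]
    | some s =>
      obtain ⟨h1, h2, h3, h4⟩ := hinv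
      simp only [pvFinish, pvOpen, pvG, List.flatMap_append, List.flatMap_cons,
        List.flatMap_nil, List.append_nil]
      (try generalize pvH hist (s - 1) = P1 at *) <;>
          (try generalize pvH hist ((k : Int) - 1) = P2 at *) <;>
          (try generalize pvH hist ((k : Int) - 1 - 1) = P3 at *) <;>
          (try generalize pvH hist ((k : Int) - 1 + 1) = P4 at *) <;>
          (try generalize pvH hist ((hist.length : Int) - 1 + 1) = P5 at *) <;>
          (try generalize pvH hist ((k : Int)) = P6 at *) <;>
          split_ifs <;> first | omega | (simp; done) | (simp; omega)
  | cons v rest ih =>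
    intro k runs start hdrop hk2 hinv
    obtain ⟨hk, hv⟩ := pvDrop_cons hdrop
    have hkc : (k : Int) < (hist.length : Int) := by exact_mod_cast hk
    have hdrop' : hist.drop (k + 1) = rest := by
      rw [← List.tail_drop, hdrop, List.tail_cons]
    have hcast : (((k + 1 : Nat)) : Int) = (k : Int) + 1 := by push_cast; ring
    have hHnext : pvH hist ((k : Int) - 1 + 1) = v := by
      rw [show (k : Int) - 1 + 1 = (k : Int) by ring]
      exact hv
    rw [PySem.List.enumerate_cons, List.foldl_cons, pvR_succ hist k hk]
    by_cases hvpos : (0 : Int) < v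
    · cases start with
      | none =>
        have h0 : k = 0 ∨ pvH hist ((k : Int) - 1) ≤ 0 := hinv
        have hstep : pvStep (runs, none) ((k : Int), v) = (runs, some (k : Int)) := by
          simp [pvStep, hvpos]
        rw [hstep]
        have hinv' : pvInv hist (k + 1) (some (k : Int)) := by
          refine ⟨by omega, by push_cast; omega, by omega, ?_⟩
          intro j hj1 hj2
          have : j = (k : Int) := by push_cast at hj2; omega
          subst this
          rw [hv]; exact hvpos
        have hih := ih (k + 1) runs (some (k : Int)) hdrop' (by omega) hinv'
        rw [hcast] at hih
        rw [hih]
        simp only [pvOpen, pvF]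
        (try generalize pvH hist (s - 1) = P1 at *) <;>
          (try generalize pvH hist ((k : Int) - 1) = P2 at *) <;>
          (try generalize pvH hist ((k : Int) - 1 - 1) = P3 at *) <;>
          (try generalize pvH hist ((k : Int) - 1 + 1) = P4 at *) <;>
          (try generalize pvH hist ((hist.length : Int) - 1 + 1) = P5 at *) <;>
          (try generalize pvH hist ((k : Int)) = P6 at *) <;>
          split_ifs <;> first | omega | (simp; done) | (simp; omega)
      | some s =>
        obtain ⟨h1, h2, h3, h4⟩ := hinv
        have hstep : pvStep (runs, some s) ((k : Int), v) = (runs, some s) := by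
          simp [pvStep, hvpos]
        rw [hstep]
        have hinv' : pvInv hist (k + 1) (some s) := by
          refine ⟨h1, by push_cast; omega, h3, ?_⟩
          intro j hj1 hj2
          push_cast at hj2
          by_cases hj : j < (k : Int)
          · exact h4 j hj1 hj
          · have : j = (k : Int) := by omega
            subst this
            rw [hv]; exact hvpos
        have hih := ih (k + 1) runs (some s) hdrop' (by omega) hinv'
        rw [hcast] at hih
        rw [hih]
        have hHk1 : 0 < pvH hist ((k : Int) - 1) := h4 _ (by omega) (by omega)
        simp only [pvOpen, pvF, List.append_assoc]
        by_cases hs : s = (k : Int) - 1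
        · subst hs
          (try generalize pvH hist (s - 1) = P1 at *) <;>
          (try generalize pvH hist ((k : Int) - 1) = P2 at *) <;>
          (try generalize pvH hist ((k : Int) - 1 - 1) = P3 at *) <;>
          (try generalize pvH hist ((k : Int) - 1 + 1) = P4 at *) <;>
          (try generalize pvH hist ((hist.length : Int) - 1 + 1) = P5 at *) <;>
          (try generalize pvH hist ((k : Int)) = P6 at *) <;>
          split_ifs <;> first | omega | (simp; done) | (simp; omega)
        · have hHk2 : 0 < pvH hist ((k : Int) - 1 - 1) := h4 _ (by omega) (by omega)
          (try generalize pvH hist (s - 1) = P1 at *) <;>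
          (try generalize pvH hist ((k : Int) - 1) = P2 at *) <;>
          (try generalize pvH hist ((k : Int) - 1 - 1) = P3 at *) <;>
          (try generalize pvH hist ((k : Int) - 1 + 1) = P4 at *) <;>
          (try generalize pvH hist ((hist.length : Int) - 1 + 1) = P5 at *) <;>
          (try generalize pvH hist ((k : Int)) = P6 at *) <;>
          split_ifs <;> first | omega | (simp; done) | (simp; omega)
    · cases start with
      | none =>
        have h0 : k = 0 ∨ pvH hist ((k : Int) - 1) ≤ 0 := hinv
        have hstep : pvStep (runs, none) ((k : Int), v) = (runs, none) := by
          simp [pvStep, hvpos]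
        rw [hstep]
        have hinv' : pvInv hist (k + 1) none := by
          right
          rw [show ((k + 1 : Nat) : Int) - 1 = (k : Int) by push_cast; ring, hv]
          omega
        have hih := ih (k + 1) runs none hdrop' (by omega) hinv'
        rw [hcast] at hih
        rw [hih]
        simp only [pvOpen, pvF]
        (try generalize pvH hist (s - 1) = P1 at *) <;>
          (try generalize pvH hist ((k : Int) - 1) = P2 at *) <;>
          (try generalize pvH hist ((k : Int) - 1 - 1) = P3 at *) <;>
          (try generalize pvH hist ((k : Int) - 1 + 1) = P4 at *) <;>
          (try generalize pvH hist ((hist.length : Int) - 1 + 1) = P5 at *) <;>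
          (try generalize pvH hist ((k : Int)) = P6 at *) <;>
          split_ifs <;> first | omega | (simp; done) | (simp; omega)
      | some s =>
        obtain ⟨h1, h2, h3, h4⟩ := hinv
        have hstep : pvStep (runs, some s) ((k : Int), v) = (runs ++ [(s, (k : Int) - 1)], none) := by
          simp [pvStep, hvpos]
        rw [hstep]
        have hinv' : pvInv hist (k + 1) none := by
          right
          rw [show ((k + 1 : Nat) : Int) - 1 = (k : Int) by push_cast; ring, hv]
          omega
        have hih := ih (k + 1) (runs ++ [(s, (k : Int) - 1)]) none hdrop' (by omega) hinv'
        rw [hcast] at hih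
        rw [hih]
        rw [List.flatMap_append]
        have hHk1 : 0 < pvH hist ((k : Int) - 1) := h4 _ (by omega) (by omega)
        simp only [pvOpen, pvF, pvG, List.flatMap_cons, List.flatMap_nil,
          List.append_nil, List.append_assoc]
        by_cases hs : s = (k : Int) - 1
        · subst hs
          (try generalize pvH hist (s - 1) = P1 at *) <;>
          (try generalize pvH hist ((k : Int) - 1) = P2 at *) <;>
          (try generalize pvH hist ((k : Int) - 1 - 1) = P3 at *) <;>
          (try generalize pvH hist ((k : Int) - 1 + 1) = P4 at *) <;>
          (try generalize pvH hist ((hist.length : Int) - 1 + 1) = P5 at *) <;>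
          (try generalize pvH hist ((k : Int)) = P6 at *) <;>
          split_ifs <;> first | omega | (simp; done) | (simp; omega)
        · have hHk2 : 0 < pvH hist ((k : Int) - 1 - 1) := h4 _ (by omega) (by omega)
          (try generalize pvH hist (s - 1) = P1 at *) <;>
          (try generalize pvH hist ((k : Int) - 1) = P2 at *) <;>
          (try generalize pvH hist ((k : Int) - 1 - 1) = P3 at *) <;>
          (try generalize pvH hist ((k : Int) - 1 + 1) = P4 at *) <;>
          (try generalize pvH hist ((hist.length : Int) - 1 + 1) = P5 at *) <;>
          (try generalize pvH hist ((k : Int)) = P6 at *) <;>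
          split_ifs <;> first | omega | (simp; done) | (simp; omega)

lemma pvKey (hist : List Int) :
    get_delimiters hist = get_delimiters_alt hist := by
  rw [pvA_flatMap, pvB_flatMap]
  have := pvMain hist hist 0 [] none (by simp) (by simp) (Or.inl rfl)
  simp only [Nat.cast_zero] at this
  rw [this]
  have hmax : max 1 ((0 : Int) - 1) = 1 := by omega
  rw [hmax]
  simp [pvOpen]

-- ===== VERDICT (by name: the statement is the Claim_ definition above) =====
theorem get_delimiters_spec : Claim_equal_get_delimiters := by
  intro hist _
  unfold Spec_get_delimiters
  exact pvKey hist
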